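-- pv_equiv track=rewrite | github.com/cs-ddjor001/S26-TeamCopper-InvoiceAI | extraction/ai_extractor.py | _find_model_match
-- ===== SOURCE A (Python) =====
-- def _find_model_match(requested: str, model_ids: list[str]) -> str | None:
--     requested_norm = requested.strip().lower()
--     for model_id in model_ids:
--         if model_id.lower() == requested_norm:
--             return model_id
--
--     for model_id in model_ids:
--         model_norm = model_id.lower()
--         if requested_norm in model_norm or model_norm in requested_norm:
--             return model_id
--
--     return None
-- ===== SOURCE B (Python) =====
-- def _find_model_match(requested: str, model_ids: list[str]) -> str | None:
--     requested_norm = requested.strip().lower()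
--     fallback = None
--     for model_id in model_ids:
--         model_norm = model_id.lower()
--         if model_norm == requested_norm:
--             return model_id
--         if fallback is None and (requested_norm in model_norm or model_norm in requested_norm):
--             fallback = model_id
--     return fallback
-- ===== Notes on version B (the rewrite author's own statement) =====
-- stated objective: simpler
-- what changed: Replaced A's two sequential scans with one single-pass loop that returns immediately on an exact (case-insensitive) match and records the first substring match in a fallback variable returned at the end.
import Mathlib
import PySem

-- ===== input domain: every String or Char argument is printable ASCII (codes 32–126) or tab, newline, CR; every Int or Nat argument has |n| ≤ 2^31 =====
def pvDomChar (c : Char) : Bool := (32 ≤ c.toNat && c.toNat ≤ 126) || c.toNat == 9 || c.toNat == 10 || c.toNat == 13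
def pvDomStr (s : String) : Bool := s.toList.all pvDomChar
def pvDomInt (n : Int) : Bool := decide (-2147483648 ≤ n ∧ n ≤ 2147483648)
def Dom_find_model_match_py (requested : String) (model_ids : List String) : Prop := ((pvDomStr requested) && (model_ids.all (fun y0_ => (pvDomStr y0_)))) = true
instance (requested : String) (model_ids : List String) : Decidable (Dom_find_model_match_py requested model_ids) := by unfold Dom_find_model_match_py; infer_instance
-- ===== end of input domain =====

-- ===== PORT A =====
-- B replaces A's two sequential scans with one single-pass loop keeping a fallback (objective: simpler).
-- first loop of A: return the first id whose lowercase equals requested_norm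
def pvLoopExact (rn : String) : List String → Option String
  | [] => none
  | m :: rest => if PySem.Str.lower m == rn then some m else pvLoopExact rn rest

-- second loop of A: return the first id related to requested_norm by substring containment
def pvLoopSub (rn : String) : List String → Option String
  | [] => none
  | m :: rest =>
    let mn := PySem.Str.lower m
    if PySem.Str.isIn rn mn || PySem.Str.isIn mn rn then some m else pvLoopSub rn rest

def find_model_match_py (requested : String) (model_ids : List String) : Option String :=
  let rn := PySem.Str.lower (PySem.Str.strip requested)
  match pvLoopExact rn model_ids with
  | some m => some m
  | none => pvLoopSub rn model_ids

-- ===== PORT B =====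
-- B's single pass: exact match returns immediately; first substring match is kept as fallback
def pvLoopB (rn : String) (fallback : Option String) : List String → Option String
  | [] => fallback
  | m :: rest =>
    let mn := PySem.Str.lower m
    if mn == rn then some m
    else if fallback.isNone && (PySem.Str.isIn rn mn || PySem.Str.isIn mn rn) then
      pvLoopB rn (some m) rest
    else pvLoopB rn fallback rest

def find_model_match_py_alt (requested : String) (model_ids : List String) : Option String :=
  pvLoopB (PySem.Str.lower (PySem.Str.strip requested)) none model_ids

-- ===== PRECONDITION & SPEC =====
def Spec_find_model_match_py (requested : String) (model_ids : List String) (out : Option String) : Prop := out = find_model_match_py_alt requested model_ids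
instance (requested : String) (model_ids : List String) (out : Option String) : Decidable (Spec_find_model_match_py requested model_ids out) := by unfold Spec_find_model_match_py; infer_instance

-- ===== CLAIM (what is proved, stated in full; the proofs are below) =====
def Claim_equal_find_model_match_py : Prop := ∀ (requested : String) (model_ids : List String), Dom_find_model_match_py requested model_ids → Spec_find_model_match_py requested model_ids (find_model_match_py requested model_ids)

-- ===== LEMMAS AND PROOFS =====
-- B's fused loop computed from A's two loops: exact match wins, else the fallback, else the substring scan
theorem pvLoopB_eq (rn : String) (fb : Option String) (l : List String) :
    pvLoopB rn fb l =
      match pvLoopExact rn l with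
      | some m => some m
      | none => match fb with
        | some f => some f
        | none => pvLoopSub rn l := by
  induction l generalizing fb with
  | nil => cases fb <;> rfl
  | cons m rest ih =>
    simp only [pvLoopB, pvLoopExact, pvLoopSub]
    by_cases h : PySem.Str.lower m == rn
    · simp [h]
    · simp only [h]
      cases fb with
      | none =>
        simp only [ih]
        cases pvLoopExact rn rest <;> simp
      | some f =>
        simp [ih]

-- ===== VERDICT (by name: the statement is the Claim_ definition above) =====
theorem find_model_match_py_spec : Claim_equal_find_model_match_py := by
  intro requested model_ids _
  unfold Spec_find_model_match_py find_model_match_py find_model_match_py_alt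
  rw [pvLoopB_eq]
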